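-- pv_equiv track=rewrite | github.com/stemnetbenchmarks/lets_test_models | do_task.py | replace_text_with_special_characters_swapback
-- ===== SOURCE A (Python) =====
-- def replace_text_with_special_characters_swapback(input_item):
--
--     if not isinstance(input_item, str):
--
--         input_item = str(input_item)
--
--     # Remove duplicate spaces
--     # input_item = re.sub(r"\s+", " ", input_item.strip())
--
--     # # original
--     # replacements = {
--     #     ",": "(comma)",
--     #     '"': "(double quote or inverted commas)",
--     #     "'": "(single quote or apostrophe)",
--     #     "[": "(left square bracket)",
--     #     "]": "(right square bracket)",
--     #     "{": "(left curly bracket)",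
--     #     "}": "(right curly bracket)",
--     #     ":": "(colon)",
--     #     "\\n": "(newline)",
--     #     "\n": "(newline)",
--     # }
--
--     reverse_replacements = {
--         "(comma)": ",",
--         "(double quote or inverted commas)": '"',
--         "(single quote or apostrophe)": "'",
--         "(left square bracket)": "[",
--         "(right square bracket)": "]",
--         "(left curly bracket)": "{",
--         "(right curly bracket)": "}",
--         "(colon)": ":",
--         "(newline)": "\n",
--     }
--
--     for char, replacement in reverse_replacements.items():
--         input_item = input_item.replace(char, replacement)
--
--     return input_item
-- ===== SOURCE B (Python) =====
-- def replace_text_with_special_characters_swapback(input_item):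
--
--     if not isinstance(input_item, str):
--         input_item = str(input_item)
--
--     reverse_replacements = {
--         "(comma)": ",",
--         "(double quote or inverted commas)": '"',
--         "(single quote or apostrophe)": "'",
--         "(left square bracket)": "[",
--         "(right square bracket)": "]",
--         "(left curly bracket)": "{",
--         "(right curly bracket)": "}",
--         "(colon)": ":",
--         "(newline)": "\n",
--     }
--
--     # single left-to-right pass instead of nine full replace() scans
--     tokens = list(reverse_replacements.items())
--     out = []
--     i = 0
--     n = len(input_item)
--     while i < n:
--         hit = None
--         if input_item[i] == "(":
--             for tok, ch in tokens:
--                 if input_item.startswith(tok, i):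
--                     hit = (tok, ch)
--                     break
--         if hit is not None:
--             out.append(hit[1])
--             i += len(hit[0])
--         else:
--             out.append(input_item[i])
--             i += 1
--     return "".join(out)
-- ===== Notes on version B (the rewrite author's own statement) =====
-- stated objective: alternative
-- what changed: Replaces nine sequential full-string str.replace passes with one left-to-right scan that, at each position, substitutes the (unique) placeholder token matching there and otherwise copies the character, building the output once.
import Mathlib
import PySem

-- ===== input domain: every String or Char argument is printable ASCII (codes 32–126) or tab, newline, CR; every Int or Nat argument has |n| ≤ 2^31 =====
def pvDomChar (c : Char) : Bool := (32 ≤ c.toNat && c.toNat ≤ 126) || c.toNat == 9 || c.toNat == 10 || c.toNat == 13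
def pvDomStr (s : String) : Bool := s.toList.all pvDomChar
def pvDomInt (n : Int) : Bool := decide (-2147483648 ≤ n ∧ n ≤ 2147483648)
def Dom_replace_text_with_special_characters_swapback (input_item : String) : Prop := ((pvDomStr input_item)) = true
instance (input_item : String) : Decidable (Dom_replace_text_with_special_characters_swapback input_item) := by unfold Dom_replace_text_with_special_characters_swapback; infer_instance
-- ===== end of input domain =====

-- B replaces A's nine sequential full-string replace passes by one left-to-right scan
-- substituting each placeholder token where it occurs (objective: alternative).


-- ===== PORT A =====
-- the reverse_replacements dict of A, in insertion order
def pvRevRepl : PySem.Dict String String := PySem.Dict.mk [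
  ("(comma)", ","),
  ("(double quote or inverted commas)", "\""),
  ("(single quote or apostrophe)", "'"),
  ("(left square bracket)", "["),
  ("(right square bracket)", "]"),
  ("(left curly bracket)", "{"),
  ("(right curly bracket)", "}"),
  ("(colon)", ":"),
  ("(newline)", "\n")]

-- the isinstance guard is the identity here: input_item is already a str
def replace_text_with_special_characters_swapback (input_item : String) : String :=
  pvRevRepl.items.foldl (fun s p => PySem.Str.replace s p.1 p.2) input_item

-- ===== PORT B =====
-- the dict items of B as (token chars, replacement char) pairs, in the same order
def pvTokens : List (List Char × Char) := [
  ("(comma)".toList, ','),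
  ("(double quote or inverted commas)".toList, '"'),
  ("(single quote or apostrophe)".toList, '\''),
  ("(left square bracket)".toList, '['),
  ("(right square bracket)".toList, ']'),
  ("(left curly bracket)".toList, '{'),
  ("(right curly bracket)".toList, '}'),
  ("(colon)".toList, ':'),
  ("(newline)".toList, '\n')]

-- B's while-loop: at each position, if the char is '(' try the tokens in order
-- (input_item.startswith(tok, i)); on a hit emit the replacement char and skip the
-- token, else copy the char.  (drop (tok.length - 1) of the tail = drop tok.length
-- of the whole list: tokens are nonempty.)
def pvScan (ts : List (List Char × Char)) : List Char → List Char
  | [] => []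
  | a :: t =>
    match (if a == '(' then ts.find? (fun p => p.1.isPrefixOf (a :: t)) else none) with
    | some (tok, ch) => ch :: pvScan ts (t.drop (tok.length - 1))
    | none => a :: pvScan ts t
termination_by l => l.length
decreasing_by
all_goals (simp only [List.length_cons, List.length_drop]; omega)

def replace_text_with_special_characters_swapback_alt (input_item : String) : String :=
  String.ofList (pvScan pvTokens input_item.toList)

-- ===== PRECONDITION & SPEC =====
def Spec_replace_text_with_special_characters_swapback (input_item : String) (out : String) : Prop := out = replace_text_with_special_characters_swapback_alt input_item
instance (input_item : String) (out : String) : Decidable (Spec_replace_text_with_special_characters_swapback input_item out) := by unfold Spec_replace_text_with_special_characters_swapback; infer_instance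

-- ===== CLAIM (what is proved, stated in full; the proofs are below) =====
def Claim_equal_replace_text_with_special_characters_swapback : Prop := ∀ (input_item : String), Dom_replace_text_with_special_characters_swapback input_item → Spec_replace_text_with_special_characters_swapback input_item (replace_text_with_special_characters_swapback input_item)

-- ===== LEMMAS AND PROOFS =====

-- direct-style form of one Python str.replace (old nonempty)
def pvRepl (old new : List Char) : List Char → List Char
  | [] => []
  | a :: t =>
    if old.isPrefixOf (a :: t) then new ++ pvRepl old new (t.drop (old.length - 1))
    else a :: pvRepl old new t
termination_by l => l.length
decreasing_by
all_goals (simp only [List.length_cons, List.length_drop]; omega)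

lemma pvGo_eq (old new : List Char) (h : old ≠ []) :
    ∀ (fuel : Nat) (l acc : List Char), l.length ≤ fuel →
      PySem.Chars.replace.go old new fuel l acc = acc.reverse ++ pvRepl old new l := by
  intro fuel
  induction fuel with
  | zero =>
    intro l acc hl
    have hl0 : l = [] := List.eq_nil_of_length_eq_zero (Nat.le_zero.mp hl)
    subst hl0
    simp [PySem.Chars.replace.go, pvRepl]
  | succ n ih =>
    intro l acc hl
    cases l with
    | nil => simp [PySem.Chars.replace.go, pvRepl]
    | cons a t =>
      obtain ⟨k, hk⟩ : ∃ k, old.length = k + 1 := by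
        cases old with
        | nil => exact absurd rfl h
        | cons x xs => exact ⟨xs.length, rfl⟩
      by_cases hp : old.isPrefixOf (a :: t)
      · rw [show PySem.Chars.replace.go old new (n+1) (a :: t) acc
              = PySem.Chars.replace.go old new n (List.drop old.length (a :: t)) (new.reverse ++ acc) by
            simp [PySem.Chars.replace.go, hp]]
        rw [ih _ _ (by simp [List.length_drop] at *; omega)]
        rw [show List.drop old.length (a :: t) = t.drop (old.length - 1) by
            rw [hk]; simp [List.drop_succ_cons]]
        rw [show pvRepl old new (a :: t) = new ++ pvRepl old new (t.drop (old.length - 1)) by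
            rw [pvRepl]; simp [hp]]
        simp
      · rw [show PySem.Chars.replace.go old new (n+1) (a :: t) acc
              = PySem.Chars.replace.go old new n t (a :: acc) by
            simp [PySem.Chars.replace.go, hp]]
        rw [ih _ _ (by simp at hl ⊢; omega)]
        rw [show pvRepl old new (a :: t) = a :: pvRepl old new t by rw [pvRepl]; simp [hp]]
        simp

lemma pvReplace_eq (old new s : List Char) (h : old ≠ []) :
    PySem.Chars.replace s old new = pvRepl old new s := by
  rw [PySem.Chars.replace]
  simp [List.isEmpty_iff, h]
  simpa using pvGo_eq old new h s.length s [] le_rfl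

-- a token starts with '(' and contains no other '('
def pvTokOk (t : List Char) : Prop := t.head? = some '(' ∧ '(' ∉ t.tail

-- well-formedness of a token table: tokens ok, no replacement char occurs in any
-- token, and no token is a prefix of a different token
def pvGood (L : List (List Char × Char)) : Prop :=
  (∀ p ∈ L, pvTokOk p.1) ∧ (∀ p ∈ L, ∀ q ∈ L, p.2 ∉ q.1) ∧
  (∀ p ∈ L, ∀ q ∈ L, p.1 ≠ q.1 → p.1.isPrefixOf q.1 = false)

lemma pvGood_tail {p L} (h : pvGood (p :: L)) : pvGood L := by
  refine ⟨fun q hq => h.1 q (List.mem_cons_of_mem _ hq),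
    fun q hq r hr => h.2.1 q (List.mem_cons_of_mem _ hq) r (List.mem_cons_of_mem _ hr),
    fun q hq r hr => h.2.2 q (List.mem_cons_of_mem _ hq) r (List.mem_cons_of_mem _ hr)⟩

-- a pattern avoiding the replacement char is a prefix of the replaced string only
-- if it was a prefix of the original
lemma pvPrefix_repl (old : List Char) (c : Char) :
    ∀ (s w : List Char), c ∉ w → w <+: pvRepl old [c] s → w <+: s := by
  intro s
  induction s with
  | nil => intro w _ hw; simpa [pvRepl] using hw
  | cons a t ih =>
    intro w hc hw
    by_cases hp : old.isPrefixOf (a :: t)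
    · rw [show pvRepl old [c] (a :: t) = c :: pvRepl old [c] (t.drop (old.length - 1)) by
          rw [pvRepl]; simp [hp]] at hw
      cases w with
      | nil => exact List.nil_prefix
      | cons b w' =>
        rw [List.cons_prefix_cons] at hw
        exact absurd (hw.1 ▸ List.mem_cons_self) hc
    · rw [show pvRepl old [c] (a :: t) = a :: pvRepl old [c] t by
          rw [pvRepl]; simp [hp]] at hw
      cases w with
      | nil => exact List.nil_prefix
      | cons b w' =>
        rw [List.cons_prefix_cons] at hw
        exact List.cons_prefix_cons.mpr ⟨hw.1, ih w' (fun h => hc (List.mem_cons_of_mem _ h)) hw.2⟩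

-- replace skips over a region none of whose nonempty suffixes starts an occurrence
lemma pvRepl_skip (old new : List Char) :
    ∀ (u rest : List Char), (∀ v, v <:+ u → v ≠ [] → ¬ old <+: (v ++ rest)) →
      pvRepl old new (u ++ rest) = u ++ pvRepl old new rest := by
  intro u
  induction u with
  | nil => intro rest _; simp
  | cons a u' ih =>
    intro rest hsuf
    have hnp : ¬ old <+: ((a :: u') ++ rest) := hsuf (a :: u') (List.suffix_refl _) (by simp)
    have hb : old.isPrefixOf (a :: (u' ++ rest)) = false := by
      simp only [Bool.eq_false_iff, ne_eq, List.isPrefixOf_iff_prefix]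
      simpa using hnp
    have : pvRepl old new (a :: (u' ++ rest)) = a :: pvRepl old new (u' ++ rest) := by
      rw [pvRepl]
      simp [hb]
    simp only [List.cons_append, this,
      ih rest (fun v hv hne => hsuf v (hv.trans (List.suffix_cons _ _)) hne)]

lemma pvScan_nil (s : List Char) : pvScan [] s = s := by
  induction s with
  | nil => rw [pvScan]
  | cons a t ih => rw [pvScan]; simp [ih]

lemma pvFind?_congr {α : Type} (p q : α → Bool) :
    ∀ (l : List α), (∀ x ∈ l, p x = q x) → l.find? p = l.find? q := by
  intro l
  induction l with
  | nil => intro _; rfl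
  | cons a l ih =>
    intro h
    simp only [List.find?]
    rw [h a List.mem_cons_self]
    cases q a with
    | true => rfl
    | false => exact ih (fun x hx => h x (List.mem_cons_of_mem _ hx))

-- x cannot start y ++ r when neither of x, y starts the other
lemma pvNotPrefixAppend {x y r : List Char} (hxy : ¬ x <+: y) (hyx : ¬ y <+: x) :
    ¬ x <+: y ++ r := by
  intro h
  rcases List.prefix_or_prefix_of_prefix h (List.prefix_append y r) with h' | h'
  · exact hxy h'
  · exact hyx h'

-- MAIN: scanning after one replace pass = scanning with that token added in front
lemma pvMain (tok : List Char) (c : Char) (ts : List (List Char × Char))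
    (hG : pvGood ((tok, c) :: ts)) :
    ∀ (n : Nat) (s : List Char), s.length ≤ n →
      pvScan ts (pvRepl tok [c] s) = pvScan ((tok, c) :: ts) s := by
  have hNP : ∀ p ∈ (tok, c) :: ts, ∀ q ∈ (tok, c) :: ts, p.1 ≠ q.1 → ¬ p.1 <+: q.1 := by
    intro p hp q hq hne
    simpa [← List.isPrefixOf_iff_prefix] using hG.2.2 p hp q hq hne
  obtain ⟨tl, htl, htl2⟩ : ∃ tl, tok = '(' :: tl ∧ '(' ∉ tl := by
    have h1 : tok.head? = some '(' ∧ '(' ∉ tok.tail := hG.1 (tok, c) List.mem_cons_self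
    cases tok with
    | nil => simp at h1
    | cons x xs =>
      have hx : x = '(' := by simpa using h1.1
      exact ⟨xs, by rw [hx], by simpa using h1.2⟩
  have hctok : c ∉ tok := hG.2.1 (tok, c) List.mem_cons_self (tok, c) List.mem_cons_self
  have hcne : c ≠ '(' := fun h => hctok (by rw [htl, h]; exact List.mem_cons_self)
  intro n
  induction n with
  | zero =>
    intro s hs
    have : s = [] := List.eq_nil_of_length_eq_zero (Nat.le_zero.mp hs)
    subst this
    simp [pvRepl, pvScan]
  | succ n ih =>
    intro s hs
    cases s with
    | nil => simp [pvRepl, pvScan]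
    | cons a t =>
      by_cases hp : tok <+: (a :: t)
      · -- token itself matches at the front
        have ha : a = '(' := by rw [htl] at hp; exact (List.cons_prefix_cons.mp hp).1.symm
        subst ha
        have hptrue : tok.isPrefixOf ('(' :: t) = true := List.isPrefixOf_iff_prefix.mpr hp
        have hL : pvRepl tok [c] ('(' :: t) = c :: pvRepl tok [c] (t.drop (tok.length - 1)) := by
          rw [pvRepl]; simp [hptrue]
        have hR : pvScan ((tok, c) :: ts) ('(' :: t)
            = c :: pvScan ((tok, c) :: ts) (t.drop (tok.length - 1)) := by
          rw [pvScan, if_pos (by simp)]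
          simp only [List.find?, hptrue]
        rw [hL, hR, pvScan]
        simp only [beq_iff_eq, hcne, if_false]
        exact congrArg (c :: ·) (ih _ (by
          simp only [List.length_cons, List.length_drop] at hs ⊢
          omega))
      · cases hf : ts.find? (fun p => p.1.isPrefixOf (a :: t)) with
        | some pr =>
          obtain ⟨t', c'⟩ := pr
          have hmem : (t', c') ∈ ts := List.mem_of_find?_eq_some hf
          have hpt' : t' <+: a :: t := by
            simpa [List.isPrefixOf_iff_prefix] using List.find?_some hf
          obtain ⟨tl', htl', htl2'⟩ : ∃ tl', t' = '(' :: tl' ∧ '(' ∉ tl' := by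
            have h1 := hG.1 (t', c') (List.mem_cons_of_mem _ hmem)
            cases ht' : t' with
            | nil => rw [ht'] at h1; exact absurd h1.1 (by simp)
            | cons x xs =>
              rw [ht'] at h1
              refine ⟨xs, ?_, by simpa using h1.2⟩
              have : x = '(' := by simpa using h1.1
              rw [this]
          have htne : tok ≠ t' := fun h => hp (h ▸ hpt')
          obtain ⟨rest, hrest⟩ := hpt'
          -- replace skips over the whole of t'
          have hskip : pvRepl tok [c] (t' ++ rest) = t' ++ pvRepl tok [c] rest := by
            apply pvRepl_skip
            intro v hv hvne hcontra
            by_cases hvt : v = t'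
            · subst hvt
              exact pvNotPrefixAppend
                (hNP (tok, c) List.mem_cons_self (v, c') (List.mem_cons_of_mem _ hmem) htne)
                (hNP (v, c') (List.mem_cons_of_mem _ hmem) (tok, c) List.mem_cons_self
                  (fun h => htne h.symm)) hcontra
            · have hvtl : v <:+ tl' := by
                rw [htl'] at hv
                rcases List.suffix_cons_iff.mp hv with h | h
                · exact absurd (h.trans htl'.symm) hvt
                · exact h
              cases v with
              | nil => exact hvne rfl
              | cons b v'' =>
                have hb : b = '(' := by
                  rw [htl] at hcontra
                  exact ((List.cons_prefix_cons.mp hcontra).1).symm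
                exact htl2' (hb ▸ hvtl.sublist.mem List.mem_cons_self)
          -- the same token is still the first match after the replace pass
          have hcong : ts.find? (fun p => p.1.isPrefixOf (t' ++ pvRepl tok [c] rest))
              = some (t', c') := by
            rw [← hf]
            apply (pvFind?_congr _ _ ts _).symm
            intro p hpm
            by_cases hpt : p.1 = t'
            · have h1 : p.1.isPrefixOf (a :: t) = true := by
                rw [List.isPrefixOf_iff_prefix, hpt, ← hrest]
                exact List.prefix_append _ _
              have h2 : p.1.isPrefixOf (t' ++ pvRepl tok [c] rest) = true := by
                rw [List.isPrefixOf_iff_prefix, hpt]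
                exact List.prefix_append _ _
              rw [h1, h2]
            · have hnp1 : ¬ p.1 <+: t' :=
                hNP (p.1, p.2) (List.mem_cons_of_mem _ hpm) (t', c')
                  (List.mem_cons_of_mem _ hmem) hpt
              have hnp2 : ¬ t' <+: p.1 :=
                hNP (t', c') (List.mem_cons_of_mem _ hmem) (p.1, p.2)
                  (List.mem_cons_of_mem _ hpm) (fun h => hpt h.symm)
              have h1 : p.1.isPrefixOf (a :: t) = false := by
                simp only [Bool.eq_false_iff, ne_eq, List.isPrefixOf_iff_prefix]
                rw [← hrest]
                exact pvNotPrefixAppend hnp1 hnp2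
              have h2 : p.1.isPrefixOf (t' ++ pvRepl tok [c] rest) = false := by
                simp only [Bool.eq_false_iff, ne_eq, List.isPrefixOf_iff_prefix]
                exact pvNotPrefixAppend hnp1 hnp2
              rw [h1, h2]
          have hrest_len : rest.length ≤ n := by
            have : t'.length + rest.length = t.length + 1 := by
              rw [← List.length_append, hrest]; simp
            have ht'len : 1 ≤ t'.length := by rw [htl']; simp
            simp at hs
            omega
          -- compute the left side
          have hL : pvScan ts (pvRepl tok [c] (a :: t))
              = c' :: pvScan ts (pvRepl tok [c] rest) := by
            rw [← hrest, hskip]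
            have : t' ++ pvRepl tok [c] rest = '(' :: (tl' ++ pvRepl tok [c] rest) := by
              rw [htl']; rfl
            rw [this, pvScan]
            have hdrop : (tl' ++ pvRepl tok [c] rest).drop (t'.length - 1)
                = pvRepl tok [c] rest := by
              rw [htl']; simp [List.drop_left (l₁ := tl')]
            rw [show (if ('(' == '(') = true then
                  ts.find? (fun p => p.1.isPrefixOf ('(' :: (tl' ++ pvRepl tok [c] rest)))
                  else none)
                = some (t', c') by rw [if_pos (by simp), ← this, hcong]]
            show c' :: pvScan ts ((tl' ++ pvRepl tok [c] rest).drop (t'.length - 1))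
                = c' :: pvScan ts (pvRepl tok [c] rest)
            rw [hdrop]
          -- compute the right side
          have ha : a = '(' := by
            have : (t' ++ rest).head? = some a := by rw [hrest]; rfl
            rw [htl'] at this
            simpa using this.symm
          have ht : t = tl' ++ rest := by
            have : ('(' :: tl') ++ rest = a :: t := by rw [← htl', hrest]
            rw [ha] at this
            simpa using this.symm
          have hR : pvScan ((tok, c) :: ts) (a :: t)
              = c' :: pvScan ((tok, c) :: ts) rest := by
            rw [pvScan]
            have hfcons : (if (a == '(') = true then
                  ((tok, c) :: ts).find? (fun p => p.1.isPrefixOf (a :: t)) else none)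
                = some (t', c') := by
              rw [if_pos (by simp [ha])]
              simp only [List.find?]
              rw [show tok.isPrefixOf (a :: t) = false by
                simpa [← List.isPrefixOf_iff_prefix] using hp]
              exact hf
            rw [hfcons]
            show c' :: pvScan ((tok, c) :: ts) (t.drop (t'.length - 1))
                = c' :: pvScan ((tok, c) :: ts) rest
            have : t.drop (t'.length - 1) = rest := by
              rw [ht, htl']; simp [List.drop_left (l₁ := tl')]
            rw [this]
          rw [hL, hR]
          exact congrArg (c' :: ·) (ih _ hrest_len)
        | none =>
          have hnone : ∀ p ∈ ts, ¬ p.1 <+: a :: t := by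
            intro p hpm
            simpa [← List.isPrefixOf_iff_prefix] using List.find?_eq_none.mp hf p hpm
          have hL0 : pvRepl tok [c] (a :: t) = a :: pvRepl tok [c] t := by
            rw [pvRepl]
            simp [List.isPrefixOf_iff_prefix, hp]
          have hfnone : ts.find? (fun p => p.1.isPrefixOf (a :: pvRepl tok [c] t)) = none := by
            rw [List.find?_eq_none]
            intro p hpm
            simp only [List.isPrefixOf_iff_prefix]
            intro hcontra
            rw [← hL0] at hcontra
            exact hnone p hpm (pvPrefix_repl tok c _ _
              (hG.2.1 (p.1, p.2) (List.mem_cons_of_mem _ hpm) (tok, c) List.mem_cons_self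
                |> fun h => by
                  exact fun hc => (hG.2.1 (tok, c) List.mem_cons_self (p.1, p.2)
                    (List.mem_cons_of_mem _ hpm)) hc) hcontra)
          have hL : pvScan ts (pvRepl tok [c] (a :: t)) = a :: pvScan ts (pvRepl tok [c] t) := by
            rw [hL0, pvScan]
            by_cases haa : a = '('
            · rw [if_pos (by simp [haa]), hfnone]
            · rw [if_neg (by simp [haa])]
          have hR : pvScan ((tok, c) :: ts) (a :: t) = a :: pvScan ((tok, c) :: ts) t := by
            rw [pvScan]
            by_cases haa : a = '('
            · rw [if_pos (by simp [haa])]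
              simp only [List.find?]
              rw [show tok.isPrefixOf (a :: t) = false by
                simpa [← List.isPrefixOf_iff_prefix] using hp]
              rw [hf]
            · rw [if_neg (by simp [haa])]
          rw [hL, hR]
          exact congrArg (a :: ·) (ih _ (by simpa using Nat.lt_succ_iff.mp (by simpa using hs)))

lemma pvChain : ∀ (L : List (List Char × Char)) (s : List Char), pvGood L →
    L.foldl (fun s p => pvRepl p.1 [p.2] s) s = pvScan L s := by
  intro L
  induction L with
  | nil => intro s _; exact (pvScan_nil s).symm
  | cons p L ih =>
    intro s hG
    calc ((p :: L).foldl (fun s q => pvRepl q.1 [q.2] s) s)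
        = L.foldl (fun s q => pvRepl q.1 [q.2] s) (pvRepl p.1 [p.2] s) := rfl
      _ = pvScan L (pvRepl p.1 [p.2] s) := ih _ (pvGood_tail hG)
      _ = pvScan ((p.1, p.2) :: L) s := pvMain p.1 p.2 L (by simpa using hG) _ s le_rfl
      _ = pvScan (p :: L) s := rfl

lemma pvGood_tokens : pvGood pvTokens := by
  unfold pvGood pvTokOk pvTokens; decide

-- ===== VERDICT (by name: the statement is the Claim_ definition above) =====
-- the nine chained replace passes, at the char level, equal the single scan
lemma pvKey (cs : List Char) :
    pvTokens.foldl (fun s p => PySem.Chars.replace s p.1 [p.2]) cs = pvScan pvTokens cs := by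
  rw [← pvChain pvTokens cs pvGood_tokens]
  simp only [pvTokens, List.foldl]
  rw [pvReplace_eq "(comma)".toList [','] cs (by decide)]
  rw [pvReplace_eq "(double quote or inverted commas)".toList ['"'] _ (by decide)]
  rw [pvReplace_eq "(single quote or apostrophe)".toList ['\''] _ (by decide)]
  rw [pvReplace_eq "(left square bracket)".toList ['['] _ (by decide)]
  rw [pvReplace_eq "(right square bracket)".toList [']'] _ (by decide)]
  rw [pvReplace_eq "(left curly bracket)".toList ['{'] _ (by decide)]
  rw [pvReplace_eq "(right curly bracket)".toList ['}'] _ (by decide)]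
  rw [pvReplace_eq "(colon)".toList [':'] _ (by decide)]
  rw [pvReplace_eq "(newline)".toList ['\n'] _ (by decide)]

theorem replace_text_with_special_characters_swapback_spec : Claim_equal_replace_text_with_special_characters_swapback := by
  intro input_item _
  unfold Spec_replace_text_with_special_characters_swapback
  unfold replace_text_with_special_characters_swapback replace_text_with_special_characters_swapback_alt
  rw [← pvKey input_item.toList]
  simp only [pvRevRepl, pvTokens, List.foldl, PySem.Str.replace,
    String.toList_ofList]
  rfl
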